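-- pv_equiv track=rewrite | github.com/sofiamalpique/fcup-programacao-II | projeto1.py | numEVP
-- ===== SOURCE A (Python) =====
-- def numEVP(lista):
--
--     # Nota: consideram-se palavras apenas as que constituem as estrofes
--
--     numEstrofes = 0
--     numPalavras = 0
--
--     for i in range(len(lista)):
--
--         numEstrofes += len(lista[i])
--
--         # o nº de versos por estrofe é constante (8)
--         numVersos = 8 * numEstrofes
--
--         for j in range(len(lista[i])):
--
--             for k in range(len(lista[i][j])):
--
--                 numPalavras += len(lista[i][j])
--
--     return (numEstrofes, numVersos, numPalavras)
-- ===== SOURCE B (Python) =====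
-- def numEVP(lista):
--     numEstrofes = sum(len(estrofes) for estrofes in lista)
--     numPalavras = sum(len(verso) ** 2 for estrofes in lista for verso in estrofes)
--     return (numEstrofes, 8 * numEstrofes, numPalavras)
-- ===== Notes on version B (the rewrite author's own statement) =====
-- stated objective: faster
-- what changed: Replaces the triply nested index loops with two flat generator sums, counting each verse's words once and squaring its length instead of re-adding len(verse) once per word.
import Mathlib
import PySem

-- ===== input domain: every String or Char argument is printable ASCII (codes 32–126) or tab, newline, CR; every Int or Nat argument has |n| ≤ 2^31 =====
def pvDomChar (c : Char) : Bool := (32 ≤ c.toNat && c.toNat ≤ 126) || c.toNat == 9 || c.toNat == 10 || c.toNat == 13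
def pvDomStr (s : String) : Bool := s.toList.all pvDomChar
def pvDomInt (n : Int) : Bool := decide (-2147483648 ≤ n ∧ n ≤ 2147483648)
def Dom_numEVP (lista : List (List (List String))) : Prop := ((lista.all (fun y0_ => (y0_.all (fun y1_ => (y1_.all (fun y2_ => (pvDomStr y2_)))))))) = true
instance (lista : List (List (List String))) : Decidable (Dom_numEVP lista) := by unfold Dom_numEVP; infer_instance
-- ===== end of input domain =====

-- B replaces A's triply nested loops (which re-add len(verse) once per word) by two flat sums,
-- squaring each verse's length once: O(number of verses) instead of O(total words).

-- ===== PORT A =====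
-- literal transliteration: the three nested for-loops become nested foldls over the same state;
-- numVersos is rebound to 8*numEstrofes on each outer iteration (its initial 0 is never
-- returned on Pre_, matching Python where it is unbound on the empty list).
def numEVP (lista : List (List (List String))) : Int × Int × Int :=
  lista.foldl (fun (st : Int × Int × Int) estrofe =>
      let numEstrofes := st.1 + (estrofe.length : Int)
      let numVersos := 8 * numEstrofes
      let numPalavras := estrofe.foldl (fun p verso =>
          verso.foldl (fun q _ => q + (verso.length : Int)) p) st.2.2
      (numEstrofes, numVersos, numPalavras)) (0, 0, 0)

-- ===== PORT B =====
def numEVP_alt (lista : List (List (List String))) : Int × Int × Int :=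
  let numEstrofes : Int := (lista.map (fun e => (e.length : Int))).sum
  let numPalavras : Int :=
    (lista.map (fun e => (e.map (fun v => (v.length : Int) * (v.length : Int))).sum)).sum
  (numEstrofes, 8 * numEstrofes, numPalavras)

-- ===== PRECONDITION & SPEC =====
-- A raises UnboundLocalError on the empty list (numVersos is never assigned); Pre_ excludes it.
def Pre_numEVP (lista : List (List (List String))) : Prop := lista ≠ []
instance (lista : List (List (List String))) : Decidable (Pre_numEVP lista) := by unfold Pre_numEVP; infer_instance
def pvWitness_numEVP : List (List (List String)) := [[["a", "b"], ["c"]], [["d", "e", "f"]]]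

def Spec_numEVP (lista : List (List (List String))) (out : Int × Int × Int) : Prop := out = numEVP_alt lista
instance (lista : List (List (List String))) (out : Int × Int × Int) : Decidable (Spec_numEVP lista out) := by unfold Spec_numEVP; infer_instance

-- ===== CLAIM (what is proved, stated in full; the proofs are below) =====
def Claim_equal_numEVP : Prop := ∀ (lista : List (List (List String))), Dom_numEVP lista → Pre_numEVP lista → Spec_numEVP lista (numEVP lista)

-- ===== LEMMAS AND PROOFS =====
-- the innermost loop adds len(verso) once per word, i.e. len(verso)² in total
lemma inner_fold (verso : List String) (q c : Int) :
    verso.foldl (fun q _ => q + c) q = q + (verso.length : Int) * c := by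
  induction verso generalizing q with
  | nil => simp
  | cons _ t ih => simp [ih]; ring

-- the middle loop accumulates the sum of squared verse lengths
lemma mid_fold (estrofe : List (List String)) (p : Int) :
    estrofe.foldl (fun p verso => verso.foldl (fun q _ => q + (verso.length : Int)) p) p
      = p + (estrofe.map (fun v => (v.length : Int) * (v.length : Int))).sum := by
  induction estrofe generalizing p with
  | nil => simp
  | cons h t ih =>
    rw [List.foldl_cons, inner_fold, ih, List.map_cons, List.sum_cons]
    ring

-- characterisation of A's outer fold from an arbitrary state
lemma outer_fold (lista : List (List (List String))) (e0 v0 p0 : Int) :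
    lista.foldl (fun (st : Int × Int × Int) estrofe =>
        let numEstrofes := st.1 + (estrofe.length : Int)
        let numVersos := 8 * numEstrofes
        let numPalavras := estrofe.foldl (fun p verso =>
            verso.foldl (fun q _ => q + (verso.length : Int)) p) st.2.2
        (numEstrofes, numVersos, numPalavras)) (e0, v0, p0)
      = (e0 + (lista.map (fun e => (e.length : Int))).sum,
         (if lista = [] then v0 else 8 * (e0 + (lista.map (fun e => (e.length : Int))).sum)),
         p0 + (lista.map (fun e => (e.map (fun v => (v.length : Int) * (v.length : Int))).sum)).sum) := by
  induction lista generalizing e0 v0 p0 with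
  | nil => simp
  | cons h t ih =>
    rw [List.foldl_cons]
    refine (ih (e0 + (h.length : Int)) (8 * (e0 + (h.length : Int)))
        (h.foldl (fun p verso => verso.foldl (fun q _ => q + (verso.length : Int)) p) p0)).trans ?_
    rw [mid_fold, List.map_cons, List.sum_cons, List.map_cons, List.sum_cons]
    rcases eq_or_ne t ([] : List (List (List String))) with ht | ht <;>
      simp [ht, Prod.ext_iff] <;> (constructor <;> ring)

-- ===== VERDICT =====
theorem numEVP_spec : Claim_equal_numEVP := by
  intro lista _ hpre
  unfold Spec_numEVP numEVP numEVP_alt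
  rw [outer_fold]
  simp [Pre_numEVP] at hpre
  simp [hpre]
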